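-- pv_equiv track=rewrite | github.com/xthemadgenius/CodingDojo | Python/Python_Knowledge/algos/w3d4/Group 2.py | missingvalue
-- ===== SOURCE A (Python) =====
-- def missingvalue(listy):
--     biggest = listy[0]
--     for i in range(len(listy)):
--         if biggest < listy[i]:
--             biggest = listy[i]
--     for j in range(0, biggest, 1):
--         if j not in listy:
--             return j
-- ===== SOURCE B (Python) =====
-- def missingvalue(listy):
--     biggest = listy[0]
--     for x in listy:
--         if biggest < x:
--             biggest = x
--     expected = 0
--     for x in sorted(listy):
--         if x == expected:
--             expected += 1
--         elif x > expected:
--             break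
--     return expected if expected < biggest else None
-- ===== Notes on version B (the rewrite author's own statement) =====
-- stated objective: alternative
-- what changed: Replaces the candidate loop that re-scans the whole list for each j in range(max) with one sorted forward pass keeping an 'expected' counter (mex), then a single comparison to the max.
import Mathlib
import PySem

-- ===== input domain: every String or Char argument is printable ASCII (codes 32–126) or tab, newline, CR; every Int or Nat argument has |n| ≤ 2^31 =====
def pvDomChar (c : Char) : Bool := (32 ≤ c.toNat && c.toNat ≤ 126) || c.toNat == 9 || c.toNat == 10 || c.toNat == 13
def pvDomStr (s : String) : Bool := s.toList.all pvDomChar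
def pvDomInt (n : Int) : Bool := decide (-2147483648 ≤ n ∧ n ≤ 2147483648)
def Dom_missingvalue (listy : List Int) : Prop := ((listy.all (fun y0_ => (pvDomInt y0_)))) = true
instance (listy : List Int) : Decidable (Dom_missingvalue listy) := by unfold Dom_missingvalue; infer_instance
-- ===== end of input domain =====

-- B replaces A's per-candidate membership scans over range(max) by one sorted
-- forward pass with an 'expected' counter (mex), then a single comparison to max (alternative algorithm).

-- ===== PORT A =====
-- the 'for j in range(0, biggest, 1): if j not in listy: return j' loop, with Python's early return
def aLoop (listy : List Int) (biggest j : Int) : Option Int :=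
  if _h : j < biggest then
    if j ∈ listy then aLoop listy biggest (j + 1) else some j
  else none
termination_by (biggest - j).toNat
decreasing_by omega

def missingvalue (listy : List Int) : Option Int :=
  match PySem.List.pyGet? listy 0 with
  | none => none  -- unreachable: Pre_ excludes [] (Python raises IndexError on the first subscript)
  | some b0 =>
    let biggest := (PySem.List.pyRange 0 (listy.length : Int) 1).foldl
      (fun b i => if b < PySem.List.pyGetD listy i 0 then PySem.List.pyGetD listy i 0 else b) b0
    aLoop listy biggest 0

-- ===== PORT B =====
def mexLoop (e : Int) (l : List Int) : Int :=
  match l with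
  | [] => e
  | x :: xs => if x = e then mexLoop (e + 1) xs else if e < x then e else mexLoop e xs

def missingvalue_alt (listy : List Int) : Option Int :=
  match listy with
  | [] => none  -- unreachable: Pre_ excludes [] (Python raises IndexError on the first subscript)
  | h :: _ =>
    let biggest := listy.foldl (fun b x => if b < x then x else b) h
    let expected := mexLoop 0 (PySem.List.sorted listy (fun x => x) false)
    if expected < biggest then some expected else none

-- ===== PRECONDITION & SPEC =====
-- Pre_ excludes only the empty list, on which Python A raises IndexError subscripting the empty list.
def Pre_missingvalue (listy : List Int) : Prop := listy ≠ []
instance (listy : List Int) : Decidable (Pre_missingvalue listy) := by unfold Pre_missingvalue; infer_instance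
def pvWitness_missingvalue : List Int := [3, 0, 2]

def Spec_missingvalue (listy : List Int) (out : Option Int) : Prop := out = missingvalue_alt listy
instance (listy : List Int) (out : Option Int) : Decidable (Spec_missingvalue listy out) := by unfold Spec_missingvalue; infer_instance

-- ===== CLAIM (what is proved, stated in full; the proofs are below) =====
def Claim_equal_missingvalue : Prop := ∀ (listy : List Int), Dom_missingvalue listy → Pre_missingvalue listy → Spec_missingvalue listy (missingvalue listy)

-- ===== LEMMAS AND PROOFS =====

lemma aLoop_eq (listy : List Int) (biggest : Int) :
    ∀ (n : Nat) (j : Int), (biggest - j).toNat = n →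
      aLoop listy biggest j = List.find? (fun x => !(listy.contains x)) (PySem.List.pyRange j biggest 1) := by
  intro n
  induction n with
  | zero =>
    intro j hn
    rw [aLoop, PySem.List.pyRange_one_eq_nil (by omega)]
    simp [show ¬ j < biggest by omega]
  | succ n ih =>
    intro j hn
    rw [aLoop, PySem.List.pyRange_one_cons (by omega)]
    rw [dif_pos (by omega : j < biggest)]
    by_cases hj : j ∈ listy
    · rw [if_pos hj, ih (j + 1) (by omega)]
      simp [List.find?, hj]
    · rw [if_neg hj]
      simp [List.find?, hj]

lemma mexLoop_cons (e x : Int) (xs : List Int) :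
    mexLoop e (x :: xs) = if x = e then mexLoop (e + 1) xs else if e < x then e else mexLoop e xs := rfl

-- mexLoop on a sorted list: result m satisfies e ≤ m, every j in [e, m) is in the list, m is not.
lemma mexLoop_spec : ∀ (l : List Int) (e : Int), l.Pairwise (· ≤ ·) →
    e ≤ mexLoop e l ∧ (∀ j, e ≤ j → j < mexLoop e l → j ∈ l) ∧ mexLoop e l ∉ l := by
  intro l
  induction l with
  | nil => intro e _; simp [mexLoop]
  | cons x xs ih =>
    intro e hp
    rw [List.pairwise_cons] at hp
    obtain ⟨hx, hxs⟩ := hp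
    by_cases hxe : x = e
    · obtain ⟨h1, h2, h3⟩ := ih (e + 1) hxs
      rw [mexLoop_cons, if_pos hxe]
      refine ⟨by omega, ?_, ?_⟩
      · intro j hj1 hj2
        by_cases hjx : j = x
        · simp [hjx]
        · exact List.mem_cons_of_mem _ (h2 j (by omega) hj2)
      · rw [List.mem_cons]
        rintro (hc | hc)
        · omega
        · exact h3 hc
    · by_cases hex : e < x
      · rw [mexLoop_cons, if_neg hxe, if_pos hex]
        refine ⟨le_refl e, ?_, ?_⟩
        · intro j hj1 hj2; omega
        · rw [List.mem_cons]
          rintro (hc | hc)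
          · omega
          · have := hx e hc; omega
      · obtain ⟨h1, h2, h3⟩ := ih e hxs
        rw [mexLoop_cons, if_neg hxe, if_neg hex]
        refine ⟨h1, ?_, ?_⟩
        · intro j hj1 hj2
          exact List.mem_cons_of_mem _ (h2 j hj1 hj2)
        · rw [List.mem_cons]
          rintro (hc | hc)
          · omega
          · exact h3 hc

-- find? over range(0, M, 1) for a predicate false below m and true at m.
lemma find?_pyRange_nat (p : Int → Bool) (m : Int) (h0 : 0 ≤ m)
    (hbelow : ∀ j : Int, 0 ≤ j → j < m → p j = false) (hm : p m = true) :
    ∀ n : Nat, List.find? p (PySem.List.pyRange 0 (n : Int) 1) =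
      if m < (n : Int) then some m else none := by
  intro n
  induction n with
  | zero =>
    rw [PySem.List.pyRange_one_eq_nil (by omega)]
    simp; omega
  | succ n ih =>
    have hcast : ((n + 1 : Nat) : Int) = (n : Int) + 1 := by push_cast; ring
    rw [hcast, PySem.List.pyRange_one_succ_right (by positivity), List.find?_append, ih]
    by_cases h1 : m < (n : Int)
    · rw [if_pos h1, if_pos (by omega)]; rfl
    · by_cases h2 : m = (n : Int)
      · rw [if_neg h1]
        simp [← h2, hm]
      · have hn : p (n : Int) = false := hbelow _ (by positivity) (by omega)
        rw [if_neg h1, if_neg (by omega)]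
        simp [hn]

lemma find?_pyRange (p : Int → Bool) (m : Int) (h0 : 0 ≤ m)
    (hbelow : ∀ j : Int, 0 ≤ j → j < m → p j = false) (hm : p m = true) (M : Int) :
    List.find? p (PySem.List.pyRange 0 M 1) = if m < M then some m else none := by
  by_cases hMn : M ≤ 0
  · rw [PySem.List.pyRange_one_eq_nil hMn]
    simp; omega
  · have hM : ((M.toNat : Nat) : Int) = M := by omega
    rw [← hM, find?_pyRange_nat p m h0 hbelow hm M.toNat]

-- ===== VERDICT (by name: the statement is the Claim_ definition above) =====
theorem missingvalue_spec : Claim_equal_missingvalue := by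
  intro listy _ hpre
  obtain ⟨h, t, rfl⟩ : ∃ h t, listy = h :: t := by
    cases listy with
    | nil => exact absurd rfl hpre
    | cons h t => exact ⟨h, t, rfl⟩
  have hget : PySem.List.pyGet? (h :: t) 0 = some h := by
    simp [PySem.List.pyGet?, PySem.List.pyIdx?]
  unfold Spec_missingvalue missingvalue missingvalue_alt
  rw [hget]
  simp only []
  rw [PySem.List.foldl_pyRange_zero_pyGetD' (h :: t) 0 (fun b v => if b < v then v else b) h]
  set M : Int := (h :: t).foldl (fun b x => if b < x then x else b) h with hM
  rw [aLoop_eq (h :: t) M (M - 0).toNat 0 rfl]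
  set s := PySem.List.sorted (h :: t) (fun x => x) false with hs
  have hperm : s.Perm (h :: t) := PySem.List.sorted_perm _ _ _
  have hpair : s.Pairwise (· ≤ ·) := PySem.List.sorted_pairwise (h :: t) (fun x => x)
  obtain ⟨hm0, hmem, hnot⟩ := mexLoop_spec s 0 hpair
  set m := mexLoop 0 s with hmdef
  rw [find?_pyRange _ m hm0
    (by intro j hj1 hj2
        have h2 : j ∈ (h :: t) := hperm.mem_iff.mp (hmem j hj1 hj2)
        simp at h2 ⊢
        tauto)
    (by have : m ∉ (h :: t) := fun hc => hnot (hperm.mem_iff.mpr hc)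
        simpa using this) M]
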